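-- pv_equiv track=rewrite | github.com/zechao/flappybird-AI | gameAI/template_contour.py | simplifyArea
-- ===== SOURCE A (Python) =====
-- def simplifyArea(obstacles):
--     newObstacle = []
--     for ob1 in obstacles:
--         if not isGround(ob1):
--             for ob2 in obstacles:
--                 if not isGround(ob2) and not isEqual(ob1, ob2) and isBeside(ob1, ob2):
--                     newObstacle.append(computeNewArea(ob1, ob2))
--         else:
--             newObstacle.append(ob1)
--     return newObstacle
--
-- def computeNewArea(ob1, ob2):
--     return (
--         (
--             min(ob1[0][0], ob2[0][0]), min(ob1[0][1], ob2[0][1])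
--         ),
--         (
--             max(ob1[1][0], ob2[1][0]), max(ob1[1][1], ob2[1][1])
--         )
--     )
--
-- def isGround(obstacle):
--     return (obstacle[1][0] - obstacle[0][0]) * (obstacle[1][1] - obstacle[0][1]) > 30000
--
-- def isEqual(ob1, ob2):
--     return ob1[0] == ob2[0] and ob1[1] == ob2[1]
--
-- def isBeside(ob1, ob2):
--     wSpaceLeft = abs(ob1[0][0] - ob2[0][0])
--     wSpaceRight = abs(ob1[1][0] - ob2[1][0])
--     hSpace = min(abs(ob1[0][1] - ob2[1][1]),abs(ob2[1][1] - ob1[0][1]))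
--     return wSpaceLeft < 4 and wSpaceRight < 4 and hSpace <6
-- ===== SOURCE B (Python) =====
-- # Spatial-hash re-implementation: bucket non-ground obstacles by x-left // 4 and,
-- # for each non-ground obstacle, probe only the three nearby buckets (the |x-left
-- # difference| < 4 test forces any partner into them), emitting partners in
-- # original index order.  O(n * k) instead of A's O(n^2).
-- def _ground(ob):
--     return (ob[1][0] - ob[0][0]) * (ob[1][1] - ob[0][1]) > 30000
--
--
-- def simplifyArea(obstacles):
--     entries = [(ob[0][0] // 4, (i, ob))
--                for i, ob in enumerate(obstacles) if not _ground(ob)]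
--     buckets = {}
--     for key, item in entries:
--         buckets.setdefault(key, []).append(item)
--     result = []
--     for ob1 in obstacles:
--         if _ground(ob1):
--             result.append(ob1)
--         else:
--             b = ob1[0][0] // 4
--             cands = buckets.get(b - 1, []) + buckets.get(b, []) + buckets.get(b + 1, [])
--             cands.sort(key=lambda q: q[0])
--             for _, ob2 in cands:
--                 if (ob2 != ob1
--                         and abs(ob1[0][0] - ob2[0][0]) < 4
--                         and abs(ob1[1][0] - ob2[1][0]) < 4
--                         and abs(ob1[0][1] - ob2[1][1]) < 6):
--                     result.append(((min(ob1[0][0], ob2[0][0]), min(ob1[0][1], ob2[0][1])),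
--                                    (max(ob1[1][0], ob2[1][0]), max(ob1[1][1], ob2[1][1]))))
--     return result
-- ===== Notes on version B (the rewrite author's own statement) =====
-- stated objective: faster
-- what changed: Replaces A's all-pairs inner scan with a spatial hash: non-ground obstacles are bucketed once by x-left // 4, and each obstacle probes only the three nearby buckets (the |x-left difference| < 4 test forces any partner there), re-sorting the few candidates by original index.
import Mathlib
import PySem

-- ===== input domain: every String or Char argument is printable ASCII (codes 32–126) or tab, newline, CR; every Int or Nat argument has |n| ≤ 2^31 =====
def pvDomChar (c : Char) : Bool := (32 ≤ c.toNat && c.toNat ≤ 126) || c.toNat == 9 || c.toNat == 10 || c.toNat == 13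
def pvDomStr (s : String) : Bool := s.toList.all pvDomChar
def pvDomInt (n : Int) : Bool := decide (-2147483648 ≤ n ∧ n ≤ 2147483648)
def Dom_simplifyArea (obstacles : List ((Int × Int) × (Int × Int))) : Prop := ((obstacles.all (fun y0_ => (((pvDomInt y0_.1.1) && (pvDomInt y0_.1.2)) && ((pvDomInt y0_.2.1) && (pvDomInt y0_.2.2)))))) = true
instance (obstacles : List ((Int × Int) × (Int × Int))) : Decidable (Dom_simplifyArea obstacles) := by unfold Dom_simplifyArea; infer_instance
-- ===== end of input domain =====

-- B replaces A's all-pairs inner scan with buckets keyed by x-left // 4 (objective: faster).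

-- ===== PORT A =====
def pvIsGround (ob : (Int × Int) × (Int × Int)) : Bool :=
  decide ((ob.2.1 - ob.1.1) * (ob.2.2 - ob.1.2) > 30000)

def pvIsEqual (o1 o2 : (Int × Int) × (Int × Int)) : Bool :=
  o1.1 == o2.1 && o1.2 == o2.2

def pvIsBeside (o1 o2 : (Int × Int) × (Int × Int)) : Bool :=
  decide (|o1.1.1 - o2.1.1| < 4) && decide (|o1.2.1 - o2.2.1| < 4) &&
    decide (min |o1.1.2 - o2.2.2| |o2.2.2 - o1.1.2| < 6)

def pvNewArea (o1 o2 : (Int × Int) × (Int × Int)) : (Int × Int) × (Int × Int) :=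
  ((min o1.1.1 o2.1.1, min o1.1.2 o2.1.2), (max o1.2.1 o2.2.1, max o1.2.2 o2.2.2))

def simplifyArea (obstacles : List ((Int × Int) × (Int × Int))) : List ((Int × Int) × (Int × Int)) :=
  obstacles.foldl (fun acc ob1 =>
    if !pvIsGround ob1 then
      obstacles.foldl (fun a ob2 =>
        if !pvIsGround ob2 && !pvIsEqual ob1 ob2 && pvIsBeside ob1 ob2 then
          a ++ [pvNewArea ob1 ob2]
        else a) acc
    else acc ++ [ob1]) []

-- ===== PORT B =====
def pvGroundB (ob : (Int × Int) × (Int × Int)) : Bool :=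
  decide ((ob.2.1 - ob.1.1) * (ob.2.2 - ob.1.2) > 30000)

def pvKeyB (ob : (Int × Int) × (Int × Int)) : Int := PySem.Int.floordiv ob.1.1 4

def pvMatchB (o1 o2 : (Int × Int) × (Int × Int)) : Bool :=
  o2 != o1 && decide (|o1.1.1 - o2.1.1| < 4) && decide (|o1.2.1 - o2.2.1| < 4) &&
    decide (|o1.1.2 - o2.2.2| < 6)

def pvAreaB (o1 o2 : (Int × Int) × (Int × Int)) : (Int × Int) × (Int × Int) :=
  ((min o1.1.1 o2.1.1, min o1.1.2 o2.1.2), (max o1.2.1 o2.2.1, max o1.2.2 o2.2.2))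

def simplifyArea_alt (obstacles : List ((Int × Int) × (Int × Int))) : List ((Int × Int) × (Int × Int)) :=
  let entries :=
    ((PySem.List.enumerate obstacles 0).filter (fun p => !pvGroundB p.2)).map
      (fun p => (pvKeyB p.2, p))
  let buckets := entries.foldl (fun d q => d.modify q.1 [] (· ++ [q.2])) PySem.Dict.empty
  obstacles.foldl (fun acc ob1 =>
    if pvGroundB ob1 then acc ++ [ob1]
    else
      let b := pvKeyB ob1
      let cands := PySem.List.sorted
        (buckets.getD (b - 1) [] ++ buckets.getD b [] ++ buckets.getD (b + 1) [])
        (fun q => q.1) false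
      cands.foldl (fun a q =>
        if pvMatchB ob1 q.2 then a ++ [pvAreaB ob1 q.2] else a) acc) []

-- ===== PRECONDITION & SPEC =====
def Spec_simplifyArea (obstacles : List ((Int × Int) × (Int × Int))) (out : List ((Int × Int) × (Int × Int))) : Prop := out = simplifyArea_alt obstacles
instance (obstacles : List ((Int × Int) × (Int × Int))) (out : List ((Int × Int) × (Int × Int))) : Decidable (Spec_simplifyArea obstacles out) := by unfold Spec_simplifyArea; infer_instance

-- ===== CLAIM (what is proved, stated in full; the proofs are below) =====
def Claim_equal_simplifyArea : Prop := ∀ (obstacles : List ((Int × Int) × (Int × Int))), Dom_simplifyArea obstacles → Spec_simplifyArea obstacles (simplifyArea obstacles)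

-- ===== LEMMAS AND PROOFS =====

-- the non-ground entries of the enumeration, and the bucket dict B builds
def pvNG (obstacles : List ((Int × Int) × (Int × Int))) : List (Int × ((Int × Int) × (Int × Int))) :=
  (PySem.List.enumerate obstacles 0).filter (fun p => !pvGroundB p.2)

def pvBuckets (obstacles : List ((Int × Int) × (Int × Int))) :
    PySem.Dict Int (List (Int × ((Int × Int) × (Int × Int)))) :=
  ((pvNG obstacles).map (fun p => (pvKeyB p.2, p))).foldl
    (fun d q => d.modify q.1 [] (· ++ [q.2])) PySem.Dict.empty

theorem pv_bucket_getD (obstacles : List ((Int × Int) × (Int × Int))) (c : Int) :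
    (pvBuckets obstacles).getD c [] = (pvNG obstacles).filter (fun p => pvKeyB p.2 == c) := by
  unfold pvBuckets
  rw [PySem.Dict.getD_foldl_modify_append]
  simp [List.filter_map, List.map_map, Function.comp_def]

-- three pairwise-distinct key filters concatenated are a permutation of the disjunctive filter
theorem pv_filter3_perm {α : Type} (l : List α) (k : α → Int) (c1 c2 c3 : Int)
    (h12 : c1 ≠ c2) (h13 : c1 ≠ c3) (h23 : c2 ≠ c3) :
    (l.filter (fun x => k x == c1) ++ l.filter (fun x => k x == c2) ++
      l.filter (fun x => k x == c3)).Perm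
      (l.filter (fun x => k x == c1 || k x == c2 || k x == c3)) := by
  induction l with
  | nil => simp
  | cons x t ih =>
    simp only [List.filter_cons]
    by_cases h1 : k x = c1
    · have e1 : (k x == c1) = true := by simp [h1]
      have e2 : (k x == c2) = false := by simp [h1]; omega
      have e3 : (k x == c3) = false := by simp [h1]; omega
      rw [e1, e2, e3]
      simp only [if_true, if_false, Bool.true_or, Bool.false_eq_true]
      exact ih.cons x
    · by_cases h2 : k x = c2
      · have e1 : (k x == c1) = false := by simp [h2]; omega
        have e2 : (k x == c2) = true := by simp [h2]
        have e3 : (k x == c3) = false := by simp [h2]; omega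
        rw [e1, e2, e3]
        simp only [if_true, if_false, Bool.true_or, Bool.false_eq_true]
        refine List.Perm.trans ?_ (ih.cons x)
        rw [List.append_assoc]
        simpa [List.append_assoc] using
          (List.perm_middle (a := x) (l₁ := List.filter (fun x => k x == c1) t)
            (l₂ := List.filter (fun x => k x == c2) t ++ List.filter (fun x => k x == c3) t))
      · by_cases h3 : k x = c3
        · have e1 : (k x == c1) = false := by simp [h3]; omega
          have e2 : (k x == c2) = false := by simp [h3]; omega
          have e3 : (k x == c3) = true := by simp [h3]
          rw [e1, e2, e3]
          simp only [if_true, if_false, Bool.true_or, Bool.false_eq_true]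
          exact List.Perm.trans List.perm_middle (ih.cons x)
        · have e1 : (k x == c1) = false := by simp [h1]
          have e2 : (k x == c2) = false := by simp [h2]
          have e3 : (k x == c3) = false := by simp [h3]
          rw [e1, e2, e3]
          simpa using ih

-- any partner within |x-left| < 4 lands in one of the three probed buckets
theorem pv_key_near (x y : Int) (h : |x - y| < 4) :
    PySem.Int.floordiv y 4 = PySem.Int.floordiv x 4 - 1 ∨
    PySem.Int.floordiv y 4 = PySem.Int.floordiv x 4 ∨
    PySem.Int.floordiv y 4 = PySem.Int.floordiv x 4 + 1 := by
  rw [PySem.Int.floordiv_eq_ediv_of_pos (by norm_num), PySem.Int.floordiv_eq_ediv_of_pos (by norm_num)]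
  rw [abs_lt] at h
  omega

-- projecting a filtered enumeration back to the elements
theorem pv_enum_proj {α β : Type} (l : List α) (s : Int) (pred : α → Bool) (f : α → β) :
    (((PySem.List.enumerate l s).filter (fun p => pred p.2)).map (fun p => f p.2)) =
      (l.filter pred).map f := by
  induction l generalizing s with
  | nil => simp [PySem.List.enumerate_nil]
  | cons x t ih =>
    rw [PySem.List.enumerate_cons, List.filter_cons, List.filter_cons]
    by_cases hp : pred x
    · simp only [hp]
      simp [ih]
    · simp only [hp]
      simp [ih]

-- the candidate list B probes, characterised
theorem pv_cands_eq (obstacles : List ((Int × Int) × (Int × Int))) (b : Int) :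
    PySem.List.sorted
      ((pvBuckets obstacles).getD (b - 1) [] ++ (pvBuckets obstacles).getD b [] ++
        (pvBuckets obstacles).getD (b + 1) []) (fun q => q.1) false =
    (pvNG obstacles).filter
      (fun p => pvKeyB p.2 == b - 1 || pvKeyB p.2 == b || pvKeyB p.2 == b + 1) := by
  rw [pv_bucket_getD, pv_bucket_getD, pv_bucket_getD]
  apply PySem.List.sorted_eq_of_perm_of_pairwise_lt
  · exact (pv_filter3_perm (pvNG obstacles) (fun p => pvKeyB p.2) (b - 1) b (b + 1)
      (by omega) (by omega) (by omega)).symm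
  · have hE : (PySem.List.enumerate obstacles 0).Pairwise (fun p q => p.1 < q.1) :=
      PySem.List.pairwise_lt_enumerate obstacles 0
    exact List.Pairwise.sublist (List.Sublist.trans List.filter_sublist List.filter_sublist) hE

-- the two per-obstacle inner loops agree
theorem pv_inner_eq (obstacles : List ((Int × Int) × (Int × Int)))
    (ob1 : (Int × Int) × (Int × Int)) (acc : List ((Int × Int) × (Int × Int))) :
    (obstacles.foldl (fun a ob2 =>
        if !pvIsGround ob2 && !pvIsEqual ob1 ob2 && pvIsBeside ob1 ob2 then
          a ++ [pvNewArea ob1 ob2]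
        else a) acc) =
    ((PySem.List.sorted
        ((pvBuckets obstacles).getD (pvKeyB ob1 - 1) [] ++ (pvBuckets obstacles).getD (pvKeyB ob1) [] ++
          (pvBuckets obstacles).getD (pvKeyB ob1 + 1) []) (fun q => q.1) false).foldl
      (fun a q => if pvMatchB ob1 q.2 then a ++ [pvAreaB ob1 q.2] else a) acc) := by
  rw [pv_cands_eq]
  rw [PySem.List.foldl_append_if, PySem.List.foldl_append_if]
  congr 1
  rw [List.filter_filter]
  have hQ : ∀ p : Int × ((Int × Int) × (Int × Int)),
      (pvMatchB ob1 p.2 &&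
        (pvKeyB p.2 == pvKeyB ob1 - 1 || pvKeyB p.2 == pvKeyB ob1 || pvKeyB p.2 == pvKeyB ob1 + 1)) =
      pvMatchB ob1 p.2 := by
    intro p
    by_cases hm : pvMatchB ob1 p.2 = true
    · rw [hm, Bool.true_and]
      have hx : |ob1.1.1 - p.2.1.1| < 4 := by
        unfold pvMatchB at hm
        simp only [Bool.and_eq_true, decide_eq_true_eq] at hm
        exact hm.1.1.2
      rcases pv_key_near ob1.1.1 p.2.1.1 hx with h | h | h <;> simp [pvKeyB] <;> simp at h <;> omega
    · have hm' : pvMatchB ob1 p.2 = false := by simpa using hm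
      rw [hm', Bool.false_and]
  simp only [hQ]
  unfold pvNG
  rw [List.filter_filter]
  have hstep : ∀ p : Int × ((Int × Int) × (Int × Int)),
      (pvMatchB ob1 p.2 && !pvGroundB p.2) =
      (!pvIsGround p.2 && !pvIsEqual ob1 p.2 && pvIsBeside ob1 p.2) := by
    intro p
    have hg : pvGroundB p.2 = pvIsGround p.2 := rfl
    have he : (p.2 != ob1) = !pvIsEqual ob1 p.2 := by
      have h1 : pvIsEqual ob1 p.2 = (ob1 == p.2) := rfl
      rw [h1, bne, Bool.beq_comm]
    have hb : pvIsBeside ob1 p.2 =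
        (decide (|ob1.1.1 - p.2.1.1| < 4) && decide (|ob1.2.1 - p.2.2.1| < 4) &&
          decide (|ob1.1.2 - p.2.2.2| < 6)) := by
      simp [pvIsBeside, abs_sub_comm p.2.2.2 ob1.1.2, min_self]
    rw [hg, hb]
    unfold pvMatchB
    rw [he]
    simp [Bool.and_assoc, Bool.and_left_comm, Bool.and_comm]
  simp only [hstep]
  have := pv_enum_proj obstacles 0
    (fun ob2 => !pvIsGround ob2 && !pvIsEqual ob1 ob2 && pvIsBeside ob1 ob2)
    (fun ob2 => pvAreaB ob1 ob2)
  rw [this]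
  rfl

-- ===== VERDICT (by name: the statement is the Claim_ definition above) =====
theorem simplifyArea_spec : Claim_equal_simplifyArea := by
  intro obstacles _
  unfold Spec_simplifyArea simplifyArea simplifyArea_alt
  congr 1
  funext acc ob1
  by_cases hg : pvIsGround ob1
  · have : pvGroundB ob1 = true := hg
    simp [hg, this]
  · have : pvGroundB ob1 = false := by simpa [pvGroundB, pvIsGround] using hg
    simp only [hg, this, Bool.not_false, if_true, Bool.false_eq_true, if_false]
    exact pv_inner_eq obstacles ob1 acc
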